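-- pv_equiv track=rewrite | github.com/adampolak/first-fit | runs/results/gen_153/main.py | zip_interleave
-- ===== SOURCE A (Python) =====
-- def zip_interleave(list_of_lists):
--     if not list_of_lists:
--         return []
--     m = max(len(lst) for lst in list_of_lists)
--     S=[]
--     for i in range(m):
--         for lst in list_of_lists:
--             if i < len(lst):
--                 S.append(lst[i])
--     return S
-- ===== SOURCE B (Python) =====
-- def zip_interleave(list_of_lists):
--     # Round-based: keep only the still-live lists each round instead of
--     # rescanning every list for every row index.
--     S = []
--     alive = [(0, lst) for lst in list_of_lists if lst]
--     while alive:
--         for i, lst in alive: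
--             S.append(lst[i])
--         alive = [(i + 1, lst) for i, lst in alive if i + 1 < len(lst)]
--     return S
-- ===== Notes on version B (the rewrite author's own statement) =====
-- stated objective: alternative
-- what changed: Instead of scanning every list for every row index (skipping exhausted ones), B maintains a shrinking worklist of (index, list) pairs and each round touches only the lists that still have elements.
import Mathlib
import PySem

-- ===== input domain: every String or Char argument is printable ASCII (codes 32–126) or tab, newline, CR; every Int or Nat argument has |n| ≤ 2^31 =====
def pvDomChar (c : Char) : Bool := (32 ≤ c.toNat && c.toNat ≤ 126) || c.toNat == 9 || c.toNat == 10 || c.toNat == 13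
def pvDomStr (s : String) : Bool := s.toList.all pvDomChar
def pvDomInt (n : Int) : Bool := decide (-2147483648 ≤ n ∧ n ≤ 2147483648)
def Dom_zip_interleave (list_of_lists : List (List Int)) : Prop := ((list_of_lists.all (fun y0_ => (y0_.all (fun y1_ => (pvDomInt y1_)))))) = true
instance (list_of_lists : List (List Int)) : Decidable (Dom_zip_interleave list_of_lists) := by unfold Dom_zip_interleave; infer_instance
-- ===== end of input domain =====

-- B replaces A's full rescan of every list per row by a shrinking worklist of still-live
-- (index, list) pairs, so each round touches only lists that still have elements.

-- ===== PORT A =====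
def zip_interleave (list_of_lists : List (List Int)) : List Int :=
  if list_of_lists = [] then []
  else
    -- m = max(len(lst) for lst in list_of_lists); the list is nonempty here, so max? is some
    let m : Int := (PySem.List.max? (list_of_lists.map (fun lst => (lst.length : Int))) (fun x => x)).getD 0
    (PySem.List.pyRange 0 m 1).foldl (fun S i =>
      list_of_lists.foldl (fun (S : List Int) (lst : List Int) =>
        if i < (lst.length : Int) then S ++ [PySem.List.pyGetD lst i 0] else S) S) []
        -- lst[i]: the guard i < len(lst) (and i ≥ 0 from range) keeps the index in range, so pyGetD is exact

-- ===== PORT B =====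
-- two termination helpers for the worklist loop (cited by its decreasing_by)
theorem zipAltMeas (l : List (Nat × List Int)) :
    ((((l.filter (fun p => p.1 + 1 < p.2.length)).map (fun p => (p.1 + 1, p.2))).map
        (fun p : Nat × List Int => p.2.length - p.1)).sum
      + (l.filter (fun p => p.1 + 1 < p.2.length)).length)
    ≤ (l.map (fun p : Nat × List Int => p.2.length - p.1)).sum := by
  induction l with
  | nil => simp
  | cons p l ih =>
    by_cases h : p.1 + 1 < p.2.length <;>
      simp [h, List.map_map] at ih ⊢ <;> omega

theorem zipAltAttach (alive : List (Nat × List Int)) :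
    ((alive.attach.filter (fun x => decide (x.val.1 + 1 < x.val.2.length))).unattach)
      = alive.filter (fun p => decide (p.1 + 1 < p.2.length)) := by
  induction alive with
  | nil => rfl
  | cons p t ih =>
    by_cases h : p.1 + 1 < p.2.length <;>
      simp [List.attach_cons, List.filter_map, List.unattach, List.map_map,
        Function.comp_def, h] at ih ⊢ <;> simpa using ih

-- the while loop of Source B: state = accumulated output S and the live (index, list) worklist
def zipAltLoop (S : List Int) (alive : List (Nat × List Int)) : List Int :=
  if h : alive = [] then S
  else
    zipAltLoop (alive.foldl (fun acc p => acc ++ [p.2.getD p.1 0]) S)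
      ((alive.filter (fun p => p.1 + 1 < p.2.length)).map (fun p => (p.1 + 1, p.2)))
      -- lst[i]: every pair in the worklist satisfies i < len(lst) by construction, so getD is exact
termination_by (alive.map (fun p : Nat × List Int => p.2.length - p.1)).sum + alive.length
decreasing_by
  simp only [List.map_subtype, List.map_map]
  rw [zipAltAttach alive]
  simp only [List.length_map]
  have := zipAltMeas alive
  have hlen : 0 < alive.length := List.length_pos_iff.mpr h
  simp [List.map_map] at this
  omega

def zip_interleave_alt (list_of_lists : List (List Int)) : List Int :=
  zipAltLoop [] ((list_of_lists.filter (fun lst => lst ≠ [])).map (fun lst => ((0 : Nat), lst)))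

-- ===== PRECONDITION & SPEC =====
def Spec_zip_interleave (list_of_lists : List (List Int)) (out : List Int) : Prop := out = zip_interleave_alt list_of_lists
instance (list_of_lists : List (List Int)) (out : List Int) : Decidable (Spec_zip_interleave list_of_lists out) := by unfold Spec_zip_interleave; infer_instance

-- ===== CLAIM (what is proved, stated in full; the proofs are below) =====
def Claim_equal_zip_interleave : Prop := ∀ (list_of_lists : List (List Int)), Dom_zip_interleave list_of_lists → Spec_zip_interleave list_of_lists (zip_interleave list_of_lists)

-- ===== LEMMAS AND PROOFS =====

-- row xs i = the elements contributed by row index i, in original list order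
def pvRow (xs : List (List Int)) (i : Nat) : List Int :=
  (xs.filter (fun l => i < l.length)).map (fun l => l.getD i 0)

-- the worklist at round i
def pvAlive (xs : List (List Int)) (i : Nat) : List (Nat × List Int) :=
  (xs.filter (fun l => i < l.length)).map (fun l => (i, l))

theorem pvFlattenSingleton {α β : Type} (l : List α) (f : α → β) :
    (l.map (fun x => [f x])).flatten = l.map f := by
  induction l with
  | nil => rfl
  | cons a t ih => simp [ih]

theorem pvAlive_heads (xs : List (List Int)) (i : Nat) (S : List Int) :
    (pvAlive xs i).foldl (fun acc p => acc ++ [p.2.getD p.1 0]) S = S ++ pvRow xs i := by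
  simp [pvAlive, pvRow, List.foldl_map, pvFlattenSingleton]

theorem pvAlive_next (xs : List (List Int)) (i : Nat) :
    ((pvAlive xs i).filter (fun p => p.1 + 1 < p.2.length)).map (fun p => (p.1 + 1, p.2))
      = pvAlive xs (i + 1) := by
  have hpred : ∀ l : List Int, (decide (i + 1 < l.length) && decide (i < l.length)) = decide (i + 1 < l.length) := by
    intro l; by_cases h : i + 1 < l.length <;> simp [h] <;> omega
  simp [pvAlive, List.filter_map, List.map_map, Function.comp_def, List.filter_filter, hpred]

theorem pvAlive_nil (xs : List (List Int)) (i : Nat) (h : pvAlive xs i = []) :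
    ∀ j, i ≤ j → pvRow xs j = [] := by
  intro j hij
  simp only [pvAlive, List.map_eq_nil_iff, List.filter_eq_nil_iff] at h
  simp only [pvRow, List.map_eq_nil_iff, List.filter_eq_nil_iff]
  intro l hl
  have := h l hl
  simp at this ⊢
  omega

theorem pvLoop (xs : List (List Int)) :
    ∀ (n i : Nat) (S : List Int), (∀ l ∈ xs, l.length ≤ i + n) →
      zipAltLoop S (pvAlive xs i) = S ++ ((List.range n).map (fun j => pvRow xs (i + j))).flatten := by
  intro n
  induction n with
  | zero =>
    intro i S hb
    have h0 : pvAlive xs i = [] := by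
      simp only [pvAlive, List.map_eq_nil_iff, List.filter_eq_nil_iff]
      intro l hl; simp; have := hb l hl; omega
    rw [h0, zipAltLoop.eq_def]; simp
  | succ n ih =>
    intro i S hb
    by_cases h0 : pvAlive xs i = []
    · rw [h0, zipAltLoop.eq_def]
      have : ∀ j : Nat, pvRow xs (i + j) = [] := fun j => pvAlive_nil xs i h0 (i + j) (by omega)
      simp [this]
    · rw [zipAltLoop.eq_def]; rw [dif_neg h0, pvAlive_heads, pvAlive_next]
      rw [ih (i + 1) (S ++ pvRow xs i) (by intro l hl; have := hb l hl; omega)]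
      rw [List.range_succ_eq_map]
      simp [List.map_map, List.append_assoc, Function.comp_def]
      congr 1
      apply List.map_congr_left
      intro j _
      congr 1
      omega

theorem pvAlt_eq (xs : List (List Int)) (n : Nat) (h : ∀ l ∈ xs, l.length ≤ n) :
    zip_interleave_alt xs = ((List.range n).map (fun j => pvRow xs j)).flatten := by
  unfold zip_interleave_alt
  have hinit : (xs.filter (fun lst => lst ≠ [])).map (fun lst => ((0 : Nat), lst)) = pvAlive xs 0 := by
    unfold pvAlive
    congr 1
    apply List.filter_congr
    intro l _
    cases l <;> simp
  rw [hinit, pvLoop xs n 0 [] (by intro l hl; have := h l hl; omega)]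
  simp

theorem pvInner (xs : List (List Int)) (k : Nat) (S : List Int) :
    xs.foldl (fun (S : List Int) (lst : List Int) =>
        if ((k : Int)) < (lst.length : Int) then S ++ [PySem.List.pyGetD lst (k : Int) 0] else S) S
      = S ++ pvRow xs k := by
  induction xs generalizing S with
  | nil => simp [pvRow]
  | cons l t ih =>
    by_cases h : k < l.length <;>
      simp [pvRow, h, ih] <;> simp [pvRow] at ih ⊢ <;> simp [ih]

theorem pvA_eq (xs : List (List Int)) (n : Nat) :
    (List.range n).foldl (fun (S : List Int) (k : Nat) => xs.foldl (fun (S : List Int) (lst : List Int) =>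
        if ((k : Int)) < (lst.length : Int) then S ++ [PySem.List.pyGetD lst (k : Int) 0] else S) S) []
      = ((List.range n).map (fun j => pvRow xs j)).flatten := by
  induction n with
  | zero => simp
  | succ n ih =>
    rw [List.range_succ, List.foldl_append, ih]
    simp only [List.foldl_cons, List.foldl_nil]
    rw [pvInner]
    simp

-- ===== VERDICT (by name: the statement is the Claim_ definition above) =====
theorem zip_interleave_spec : Claim_equal_zip_interleave := by
  intro xs _
  unfold Spec_zip_interleave zip_interleave
  by_cases hxs : xs = []
  · subst hxs
    rw [pvAlt_eq [] 0 (by simp)]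
    simp
  · rw [if_neg hxs]
    -- the maximum length m
    obtain ⟨m, hm⟩ : ∃ m, PySem.List.max? (xs.map (fun lst => (lst.length : Int))) (fun x => x) = some m := by
      cases hopt : PySem.List.max? (xs.map (fun lst => (lst.length : Int))) (fun x => x) with
      | none =>
        exfalso
        rw [PySem.List.max?_eq_none_iff] at hopt
        exact hxs (List.map_eq_nil_iff.mp hopt)
      | some m => exact ⟨m, rfl⟩
    have hmem : m ∈ xs.map (fun lst => (lst.length : Int)) := PySem.List.max?_mem hm
    have hm0 : 0 ≤ m := by
      obtain ⟨l, _, hl⟩ := List.mem_map.mp hmem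
      omega
    have hmax : ∀ l ∈ xs, l.length ≤ m.toNat := by
      intro l hl
      have := PySem.List.max?_isMax hm ((l.length : Int)) (List.mem_map_of_mem hl)
      omega
    rw [hm]
    simp only [Option.getD_some]
    rw [PySem.List.pyRange_one, List.foldl_map]
    simp only [zero_add, Int.sub_zero]
    rw [pvA_eq xs m.toNat, pvAlt_eq xs m.toNat hmax]
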